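-- pv_equiv track=rewrite | github.com/Ai-Sasit/CS-Calculator-Flask | PyModule/calculatebase.py | subBitbinary
-- ===== SOURCE A (Python) =====
-- def subBitbinary(T,S,loop):
--     N4S = str(bin(int(T,2) + int(S,2))[2:]) ; S4 = list()
--     for i in range(1,loop+1):
--         try:
--             if N4S[-i] == "1":
--                 S4.append(N4S[-i])
--             else: S4.append("0")
--         except: S4.append("0")
--     return ("").join(S4[-1::-1])
-- ===== SOURCE B (Python) =====
-- def subBitbinary(T, S, loop):
--     value = int(T, 2) + int(S, 2)
--     bits = [str((value >> j) & 1) for j in range(loop)]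
--     return "".join(reversed(bits))
-- ===== Notes on version B (the rewrite author's own statement) =====
-- stated objective: idiomatic
-- what changed: B never builds or indexes the binary string: it keeps the sum as an integer and extracts each output bit arithmetically with shift-and-mask, shifts past the top bit giving the zero padding that A obtains from a caught IndexError.
-- outside the precondition, e.g. on subBitbinary('-1', '0', 3): A returns '001', B returns '111'
import Mathlib
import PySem

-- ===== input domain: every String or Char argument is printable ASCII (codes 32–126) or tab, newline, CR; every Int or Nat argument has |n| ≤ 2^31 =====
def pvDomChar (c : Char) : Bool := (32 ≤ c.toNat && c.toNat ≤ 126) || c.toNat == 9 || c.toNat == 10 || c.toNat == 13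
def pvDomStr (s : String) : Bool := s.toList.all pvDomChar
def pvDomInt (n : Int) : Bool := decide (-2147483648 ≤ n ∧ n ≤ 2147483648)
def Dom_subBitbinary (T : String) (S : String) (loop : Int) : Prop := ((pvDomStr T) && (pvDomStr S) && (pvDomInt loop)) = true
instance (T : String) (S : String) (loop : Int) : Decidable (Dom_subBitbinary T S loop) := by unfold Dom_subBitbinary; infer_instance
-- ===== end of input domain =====

-- B replaces A's string-indexing over bin(...) with arithmetic bit extraction (shift-and-mask) on the integer sum; return-value equivalence on Pre_.

-- ===== PORT A =====
def subBitbinary (T : String) (S : String) (loop : Int) : String :=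
  match PySem.Int.ofStrBase? T 2, PySem.Int.ofStrBase? S 2 with
  | some t, some s =>
    -- N4S = str(bin(int(T,2) + int(S,2))[2:])
    let N4S : List Char := PySem.List.slice (PySem.Int.pyBin (t + s)).toList (some 2) none
    -- for i in range(1, loop+1): try N4S[-i] … except: append "0"   (elements are 1-char strings, kept as chars)
    let S4 : List Char := (PySem.List.pyRange 1 (loop + 1) 1).foldl
      (fun S4 i =>
        match PySem.List.pyGet? N4S (-i) with
        | some c => if c = '1' then S4 ++ [c] else S4 ++ ['0']
        | none => S4 ++ ['0'])
      []
    -- "".join(S4[-1::-1]) : S4[-1::-1] is the full reverse of S4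
    String.ofList S4.reverse
  | _, _ => ""   -- int(·, 2) raised ValueError: outside Pre_

-- ===== PORT B =====
def subBitbinary_alt (T : String) (S : String) (loop : Int) : String :=
  match PySem.Int.ofStrBase? T 2 with
  | none => ""   -- int(T, 2) raised ValueError: outside Pre_
  | some t =>
    match PySem.Int.ofStrBase? S 2 with
    | none => ""   -- int(S, 2) raised ValueError: outside Pre_
    | some s =>
      let value : Int := t + s
      -- (value >> j) & 1 ported by hand: for j ≥ 0 Python's value >> j is floor-division by 2^j and & 1 is mod 2 (exact for all ints)
      let bits : List String := (PySem.List.pyRange 0 loop 1).map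
        (fun j => PySem.Int.toStr (PySem.Int.mod (PySem.Int.floordiv value (2 ^ j.toNat)) 2))
      PySem.Str.join "" bits.reverse

-- ===== PRECONDITION & SPEC =====
-- Pre_ excludes (a) inputs where int(T,2) or int(S,2) raises ValueError, and (b) inputs whose sum is
-- negative, where A's value ('b' and the digits of |sum| sliced out of '-0b…') is an accidental
-- artefact of slicing bin()'s sign prefix — a defensible-corner value B does not reproduce.
def Pre_subBitbinary (T : String) (S : String) (loop : Int) : Prop :=
  (PySem.Int.ofStrBase? T 2).isSome ∧ (PySem.Int.ofStrBase? S 2).isSome ∧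
  0 ≤ (PySem.Int.ofStrBase? T 2).getD 0 + (PySem.Int.ofStrBase? S 2).getD 0
instance (T : String) (S : String) (loop : Int) : Decidable (Pre_subBitbinary T S loop) := by
  unfold Pre_subBitbinary; infer_instance
def pvWitness_subBitbinary : String × String × Int := ("101", "11", 4)

def Spec_subBitbinary (T : String) (S : String) (loop : Int) (out : String) : Prop := out = subBitbinary_alt T S loop
instance (T : String) (S : String) (loop : Int) (out : String) : Decidable (Spec_subBitbinary T S loop out) := by unfold Spec_subBitbinary; infer_instance

-- ===== CLAIM (what is proved, stated in full; the proofs are below) =====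
def Claim_equal_subBitbinary : Prop := ∀ (T : String) (S : String) (loop : Int), Dom_subBitbinary T S loop → Pre_subBitbinary T S loop → Spec_subBitbinary T S loop (subBitbinary T S loop)

-- ===== LEMMAS AND PROOFS =====

-- the binary digits of n, little-endian (least-significant first)
def pvBitsLE (n : Nat) : List Char :=
  if h : n / 2 = 0 then [Nat.digitChar (n % 2)]
  else Nat.digitChar (n % 2) :: pvBitsLE (n / 2)
decreasing_by
  exact Nat.div_lt_self (Nat.pos_of_ne_zero (fun h0 => h (by simp [h0]))) (by norm_num)

theorem pvToDigitsCore_eq (fuel : Nat) : ∀ (n : Nat) (acc : List Char), n < fuel →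
    Nat.toDigitsCore 2 fuel n acc = (pvBitsLE n).reverse ++ acc := by
  induction fuel with
  | zero => intro n acc h; omega
  | succ f ih =>
    intro n acc h
    rw [pvBitsLE]
    by_cases h2 : n / 2 = 0
    · simp [Nat.toDigitsCore, h2]
    · have hlt : n / 2 < f := by
        have hn : n ≠ 0 := by intro h0; subst h0; simp at h2
        have : n / 2 < n := Nat.div_lt_self (Nat.pos_of_ne_zero hn) one_lt_two
        omega
      simp [Nat.toDigitsCore, h2, ih (n / 2) _ hlt]

theorem pvBitsLE_getElem? (n : Nat) : ∀ (k : Nat), k < (pvBitsLE n).length →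
    (pvBitsLE n)[k]? = some (Nat.digitChar (n / 2 ^ k % 2)) := by
  induction n using pvBitsLE.induct with
  | case1 n h =>
    intro k hk
    rw [pvBitsLE] at hk ⊢
    simp only [h, dite_true, List.length_singleton] at hk ⊢
    interval_cases k <;> simp
  | case2 n h ih =>
    intro k hk
    rw [pvBitsLE] at hk ⊢
    simp only [h, dite_false] at hk ⊢
    cases k with
    | zero => simp
    | succ k =>
      simp only [List.getElem?_cons_succ]
      rw [ih k (by simpa using hk)]
      congr 2
      rw [pow_succ']
      rw [Nat.div_div_eq_div_mul]

theorem pvBitsLE_div_eq_zero (n : Nat) : ∀ (k : Nat), (pvBitsLE n).length ≤ k → n / 2 ^ k = 0 := by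
  induction n using pvBitsLE.induct with
  | case1 n h =>
    intro k hk
    rw [pvBitsLE] at hk
    simp [h] at hk
    have h1 : n < 2 := by omega
    have h2 : n / 2 ^ k ≤ n / 2 ^ 1 := Nat.div_le_div_left (Nat.pow_le_pow_right (by norm_num) hk) (by positivity)
    simp only [pow_one] at h2
    rw [h] at h2
    exact Nat.le_zero.mp h2
  | case2 n h ih =>
    intro k hk
    rw [pvBitsLE] at hk
    simp only [h, dite_false, List.length_cons] at hk
    cases k with
    | zero => omega
    | succ k =>
      have := ih k (by omega)
      rw [pow_succ', ← Nat.div_div_eq_div_mul]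
      exact this

theorem pvGet_reverse (l : List Char) (k : Nat) :
    PySem.List.pyGet? l.reverse (-(1 + (k : Int))) = l[k]? := by
  by_cases hk : k < l.length
  · have h1 : 0 < k + 1 := by omega
    have h2 : k + 1 ≤ l.reverse.length := by simpa using hk
    have : (-(1 + (k : Int))) = -((k + 1 : Nat) : Int) := by push_cast; ring
    rw [this, PySem.List.pyGet?_neg_natCast _ _ h1 h2]
    rw [List.length_reverse]
    rw [List.getElem?_reverse (by omega)]
    congr 1
    omega
  · rw [List.getElem?_eq_none (by omega)]
    rw [PySem.List.pyGet?_eq_none_iff]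
    intro hin
    unfold PySem.Raise.InRange at hin
    simp at hin
    omega

theorem pvCharA (m k : Nat) :
    (match PySem.List.pyGet? (pvBitsLE m).reverse (-(1 + (k : Int))) with
      | some c => if c = '1' then c else '0'
      | none => '0') = Nat.digitChar (m / 2 ^ k % 2) := by
  rw [pvGet_reverse]
  by_cases hk : k < (pvBitsLE m).length
  · rw [pvBitsLE_getElem? m k hk]
    have : m / 2 ^ k % 2 = 0 ∨ m / 2 ^ k % 2 = 1 := by omega
    rcases this with h | h <;> rw [h] <;> simp [Nat.digitChar]
  · rw [List.getElem?_eq_none (by omega)]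
    have := pvBitsLE_div_eq_zero m k (by omega)
    rw [this]
    simp [Nat.digitChar]

theorem pvCharB (m k : Nat) :
    PySem.Int.toStr (PySem.Int.mod (PySem.Int.floordiv (m : Int) (2 ^ k)) 2) =
      String.ofList [Nat.digitChar (m / 2 ^ k % 2)] := by
  have h1 : PySem.Int.floordiv (m : Int) ((2 : Int) ^ k) = ((m / 2 ^ k : Nat) : Int) := by
    simp only [PySem.Int.floordiv]
    rw [show ((2 : Int) ^ k) = ((2 ^ k : Nat) : Int) by push_cast; ring]
    exact (Int.ofNat_fdiv m (2 ^ k)).symm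
  have h2 : PySem.Int.mod ((m / 2 ^ k : Nat) : Int) 2 = ((m / 2 ^ k % 2 : Nat) : Int) := by
    simp only [PySem.Int.mod]
    rw [show (2 : Int) = ((2 : Nat) : Int) by norm_num]
    exact (Int.ofNat_fmod _ 2).symm
  rw [h1, h2]
  have : m / 2 ^ k % 2 = 0 ∨ m / 2 ^ k % 2 = 1 := by omega
  rcases this with h | h <;> rw [h] <;> decide

theorem pvToDigits_eq (n : Nat) : Nat.toDigits 2 n = (pvBitsLE n).reverse := by
  simpa using pvToDigitsCore_eq (n + 1) n [] (by omega)

theorem pvFoldl_append_map {α β : Type} (xs : List α) (g : α → List β) (acc : List β) :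
    xs.foldl (fun a x => a ++ g x) acc = acc ++ xs.flatMap g := by
  induction xs generalizing acc with
  | nil => simp
  | cons x xs ih => simp [ih, List.flatMap_cons]

theorem pvIntercalate_nil {α : Type} (l : List (List α)) : List.intercalate [] l = l.flatten := by
  induction l with
  | nil => simp [List.intercalate]
  | cons x t ih =>
    cases t with
    | nil => simp [List.intercalate]
    | cons y u =>
      simp only [List.intercalate, List.intersperse] at ih ⊢
      simp_all

theorem pvFlattenRevSingletons {α β : Type} (xs : List α) (f : α → β) :
    ((xs.map (fun x => [f x])).reverse).flatten = (xs.map f).reverse := by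
  induction xs with
  | nil => simp
  | cons x t ih => simp [ih]

-- ===== VERDICT (by name: the statement is the Claim_ definition above) =====
theorem subBitbinary_spec : Claim_equal_subBitbinary := by
  intro T S loop _ hpre
  unfold Spec_subBitbinary
  obtain ⟨hT, hS, hsum⟩ := hpre
  cases hTe : PySem.Int.ofStrBase? T 2 with
  | none => rw [hTe] at hT; simp at hT
  | some t =>
  cases hSe : PySem.Int.ofStrBase? S 2 with
  | none => rw [hSe] at hS; simp at hS
  | some s =>
  rw [hTe, hSe] at hsum
  simp only [Option.getD_some] at hsum
  set m : Nat := (t + s).toNat with hm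
  have hts : t + s = (m : Int) := by omega
  -- evaluate A's N4S
  have hN4S : PySem.List.slice (PySem.Int.pyBin (t + s)).toList (some 2) none = (pvBitsLE m).reverse := by
    rw [PySem.Int.toList_pyBin]
    simp only [PySem.Int.toBinChars0b]
    rw [if_neg (by omega)]
    rw [PySem.List.slice_from _ (show (0:Int) ≤ 2 by norm_num)]
    rw [hts]
    simp [pvToDigits_eq]
  simp only [subBitbinary, subBitbinary_alt, hTe, hSe, hN4S]
  -- A's loop body appends exactly one char
  have hbody : (fun (acc : List Char) (i : Int) =>
      (match PySem.List.pyGet? (pvBitsLE m).reverse (-i) with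
        | some c => if c = '1' then acc ++ [c] else acc ++ ['0']
        | none => acc ++ ['0'])) =
      (fun (acc : List Char) (i : Int) => acc ++ [(match PySem.List.pyGet? (pvBitsLE m).reverse (-i) with
        | some c => if c = '1' then c else '0'
        | none => '0')]) := by
    funext acc i
    cases h : PySem.List.pyGet? (pvBitsLE m).reverse (-i) with
    | none => simp
    | some c => by_cases hc : c = '1' <;> simp [hc]
  rw [hbody, pvFoldl_append_map]
  simp only [List.nil_append]
  -- both ranges as List.range
  rw [PySem.List.pyRange_one 1 (loop + 1), PySem.List.pyRange_one 0 loop]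
  have hn : (loop + 1 - 1).toNat = (loop - 0).toNat := by omega
  rw [hn]
  set n : Nat := (loop - 0).toNat with hndef
  rw [List.flatMap_map]
  have hA : (List.range n).flatMap
          (fun (a : Nat) => [(match PySem.List.pyGet? (pvBitsLE m).reverse (-(1 + (a : Int))) with
              | some c => if c = '1' then c else '0'
              | none => '0')]) = (List.range n).map (fun a => Nat.digitChar (m / 2 ^ a % 2)) := by
    rw [← List.map_eq_flatMap]
    exact List.map_congr_left (fun a _ => pvCharA m a)
  rw [hA, PySem.Str.join]
  congr 1
  rw [List.map_reverse, List.map_map, List.map_map]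
  have hB : (List.range n).map ((String.toList ∘ fun j => PySem.Int.toStr (PySem.Int.mod (PySem.Int.floordiv (t + s) (2 ^ j.toNat)) 2)) ∘ fun k : Nat => (0 : Int) + (k : Int))
      = (List.range n).map (fun a => [Nat.digitChar (m / 2 ^ a % 2)]) := by
    apply List.map_congr_left
    intro a _
    simp only [Function.comp_apply]
    rw [hts]
    rw [show ((0 : Int) + (a : Int)).toNat = a by omega]
    rw [pvCharB m a]
    exact String.toList_ofList
  rw [hB]
  rw [show ("" : String).toList = [] from rfl]
  simp only [PySem.Chars.join]
  rw [pvIntercalate_nil, pvFlattenRevSingletons]
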